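-- pv_equiv track=rewrite | github.com/Shubhankar9934/Socio_Sim_AI | agents/context_relevance.py | filter_memories_for_topic
-- ===== SOURCE A (Python) =====
-- from typing import Any, Dict, List, Optional
--
-- def filter_memories_for_topic(memories: List[str], topic: str, max_items: int = 5) -> List[str]:
--     """Light keyword filter so weakly related memories drop off for narrow topics."""
--     if not memories or not topic:
--         return memories[:max_items]
--     t = topic.lower()
--     topic_kw = {
--         "housing": ("rent", "lease", "flat", "apartment", "home", "landlord", "room", "housing", "move", "jvc", "marina"),
--         "cost_of_living": ("price", "cost", "afford", "budget", "expensive", "bill", "salary", "money", "inflation"),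
--         "food_delivery": ("food", "deliver", "order", "meal", "restaurant", "eat", "cook"),
--         "transport": ("commute", "metro", "car", "drive", "traffic", "parking", "bus", "transport"),
--     }
--     kws = topic_kw.get(t, ())
--     if not kws:
--         return memories[:max_items]
--     scored: List[tuple[int, str]] = []
--     for i, m in enumerate(memories):
--         low = m.lower()
--         score = sum(1 for k in kws if k in low)
--         scored.append((score, i, m))
--     scored.sort(key=lambda x: (-x[0], x[1]))
--     high = [m for s, _, m in scored if s > 0]
--     low = [m for s, _, m in scored if s == 0]
--     return (high + low)[:max_items]
-- ===== SOURCE B (Python) =====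
-- from typing import List
--
-- def filter_memories_for_topic(memories: List[str], topic: str, max_items: int = 5) -> List[str]:
--     """Bucket (counting) version: one pass buckets memories by score, no comparison sort."""
--     if not memories or not topic:
--         return memories[:max_items]
--     topic_kw = {
--         "housing": ("rent", "lease", "flat", "apartment", "home", "landlord", "room", "housing", "move", "jvc", "marina"),
--         "cost_of_living": ("price", "cost", "afford", "budget", "expensive", "bill", "salary", "money", "inflation"),
--         "food_delivery": ("food", "deliver", "order", "meal", "restaurant", "eat", "cook"),
--         "transport": ("commute", "metro", "car", "drive", "traffic", "parking", "bus", "transport"),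
--     }
--     kws = topic_kw.get(topic.lower(), ())
--     if not kws:
--         return memories[:max_items]
--     buckets: List[List[str]] = [[] for _ in range(len(kws) + 1)]
--     for m in memories:
--         low = m.lower()
--         score = sum(1 for k in kws if k in low)
--         buckets[score].append(m)
--     out: List[str] = []
--     for b in reversed(buckets):
--         out.extend(b)
--     return out[:max_items]
-- ===== Notes on version B (the rewrite author's own statement) =====
-- stated objective: alternative
-- what changed: B drops A's (-score, index) comparison sort plus the high/low split and instead fills per-score buckets in one pass over the memories, reading them out from highest score down, which preserves index order; scoring work is unchanged and there is no Pre_.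
import Mathlib
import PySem

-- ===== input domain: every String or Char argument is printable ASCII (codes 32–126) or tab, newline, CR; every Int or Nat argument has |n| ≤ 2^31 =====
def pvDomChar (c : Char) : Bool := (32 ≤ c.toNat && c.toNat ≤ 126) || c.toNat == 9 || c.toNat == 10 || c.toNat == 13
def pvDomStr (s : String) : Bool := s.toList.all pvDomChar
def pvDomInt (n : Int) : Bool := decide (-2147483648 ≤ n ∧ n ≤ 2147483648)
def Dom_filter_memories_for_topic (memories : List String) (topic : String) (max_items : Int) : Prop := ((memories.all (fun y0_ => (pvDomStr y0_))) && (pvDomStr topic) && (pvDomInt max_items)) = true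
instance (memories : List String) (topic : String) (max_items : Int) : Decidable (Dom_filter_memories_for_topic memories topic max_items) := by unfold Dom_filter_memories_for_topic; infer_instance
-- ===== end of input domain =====

-- B replaces A's comparison sort by (-score, index) with score buckets filled in one pass
-- and read out from highest score down (alternative algorithm, same observable result).

-- ===== PORT A =====
-- the topic_kw dict literal (identical in A's and B's source; a PySem.Dict: association list in insertion order)
def pvTopicKw : PySem.Dict String (List String) := PySem.Dict.ofList
  [("housing", ["rent", "lease", "flat", "apartment", "home", "landlord", "room", "housing", "move", "jvc", "marina"]),
   ("cost_of_living", ["price", "cost", "afford", "budget", "expensive", "bill", "salary", "money", "inflation"]),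
   ("food_delivery", ["food", "deliver", "order", "meal", "restaurant", "eat", "cook"]),
   ("transport", ["commute", "metro", "car", "drive", "traffic", "parking", "bus", "transport"])]

def filter_memories_for_topic (memories : List String) (topic : String) (max_items : Int) : List String :=
  if memories.isEmpty || topic == "" then PySem.List.slice memories none (some max_items) else
  let t := PySem.Str.lower topic
  let kws := PySem.Dict.getD pvTopicKw t []
  if kws = [] then PySem.List.slice memories none (some max_items) else
  let scored : List (Int × Int × String) :=
    (PySem.List.enumerate memories).foldl (fun acc im =>
      let low := PySem.Str.lower im.2
      let score : Int := ((kws.filter (fun k => PySem.Str.isIn k low)).map (fun _ => (1:Int))).sum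
      acc ++ [(score, im.1, im.2)]) []
  let srt := PySem.List.sorted2 scored (fun x => -x.1) (fun x => x.2.1)
  let high := (srt.filter (fun x => decide ((0:Int) < x.1))).map (fun x => x.2.2)
  let low := (srt.filter (fun x => decide (x.1 = (0:Int)))).map (fun x => x.2.2)
  PySem.List.slice (high ++ low) none (some max_items)

-- ===== PORT B =====
def filter_memories_for_topic_alt (memories : List String) (topic : String) (max_items : Int) : List String :=
  if memories.isEmpty || topic == "" then PySem.List.slice memories none (some max_items) else
  let kws := PySem.Dict.getD pvTopicKw (PySem.Str.lower topic) []
  if kws = [] then PySem.List.slice memories none (some max_items) else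
  let buckets : List (List String) :=
    memories.foldl (fun bs m =>
      let low := PySem.Str.lower m
      let score : Nat := (kws.filter (fun k => PySem.Str.isIn k low)).length
      bs.set score (bs.getD score [] ++ [m]))
      (List.replicate (kws.length + 1) [])
  let out := buckets.reverse.foldl (fun acc b => acc ++ b) []
  PySem.List.slice out none (some max_items)

-- ===== PRECONDITION & SPEC =====
def Spec_filter_memories_for_topic (memories : List String) (topic : String) (max_items : Int) (out : List String) : Prop := out = filter_memories_for_topic_alt memories topic max_items
instance (memories : List String) (topic : String) (max_items : Int) (out : List String) : Decidable (Spec_filter_memories_for_topic memories topic max_items out) := by unfold Spec_filter_memories_for_topic; infer_instance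

-- ===== CLAIM (what is proved, stated in full; the proofs are below) =====
def Claim_equal_filter_memories_for_topic : Prop := ∀ (memories : List String) (topic : String) (max_items : Int), Dom_filter_memories_for_topic memories topic max_items → Spec_filter_memories_for_topic memories topic max_items (filter_memories_for_topic memories topic max_items)

-- ===== LEMMAS AND PROOFS =====

-- the (Nat) score of one memory, the quantity both loops compute
def pvSc (kws : List String) (m : String) : Nat :=
  (kws.filter (fun k => PySem.Str.isIn k (PySem.Str.lower m))).length

-- Python's stable sort with the tuple key (k1 x, k2 x) is the sort by the lexicographic key
theorem pv_sorted2_eq {α : Type} (xs : List α) (k1 k2 : α → Int) :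
    PySem.List.sorted2 xs k1 k2 = PySem.List.sorted xs (fun x => toLex (k1 x, k2 x)) := by
  have hfun : (fun (a b : α) => decide (k1 a < k1 b) || (!decide (k1 b < k1 a) && decide (k2 a < k2 b)))
      = (fun a b => decide ((fun x => toLex (k1 x, k2 x)) a < (fun x => toLex (k1 x, k2 x)) b)) := by
    funext a b
    rcases lt_trichotomy (k1 a) (k1 b) with h|h|h
    · simp [Prod.Lex.toLex_lt_toLex, h]
    · simp [Prod.Lex.toLex_lt_toLex, h]
    · simp [Prod.Lex.toLex_lt_toLex, h, lt_asymm h, h.ne']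
  rw [PySem.List.sorted_eq_foldl_insertBy]
  show List.foldl (fun acc x => PySem.List.insertBy
      (fun a b => decide (k1 a < k1 b) || (!decide (k1 b < k1 a) && decide (k2 a < k2 b))) x acc) [] xs = _
  rw [hfun]

-- enumerate: indices are at least the start index
theorem pv_enum_ge {α : Type} (xs : List α) (i : Int) :
    ∀ y ∈ PySem.List.enumerate xs i, i ≤ y.1 := by
  induction xs generalizing i with
  | nil => simp [PySem.List.enumerate]
  | cons x t ih =>
    intro y hy
    rw [show PySem.List.enumerate (x :: t) i = (i, x) :: PySem.List.enumerate t (i+1) from rfl] at hy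
    rcases List.mem_cons.mp hy with h | h
    · rw [h]
    · have := ih (i+1) y h; omega

-- enumerate: indices strictly increase
theorem pv_enum_pairwise {α : Type} (xs : List α) (i : Int) :
    (PySem.List.enumerate xs i).Pairwise (fun a b => a.1 < b.1) := by
  induction xs generalizing i with
  | nil => exact List.Pairwise.nil
  | cons x t ih =>
    rw [show PySem.List.enumerate (x :: t) i = (i, x) :: PySem.List.enumerate t (i+1) from rfl]
    refine List.Pairwise.cons ?_ (ih (i+1))
    intro y hy
    have := pv_enum_ge t (i+1) y hy
    show i < y.1
    omega

-- dropping the indices of a filtered enumeration gives the filtered list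
theorem pv_enum_map_filter {α : Type} (xs : List α) (i : Int) (p : α → Bool) :
    ((PySem.List.enumerate xs i).filter (fun e => p e.2)).map (fun e => e.2) = xs.filter p := by
  induction xs generalizing i with
  | nil => rfl
  | cons x t ih =>
    rw [show PySem.List.enumerate (x :: t) i = (i, x) :: PySem.List.enumerate t (i+1) from rfl]
    by_cases hx : p x <;> simp [hx, ih]

-- partition by score value: the buckets, read out in descending order, are a permutation
theorem pv_part_perm {α : Type} (f : α → Int) :
    ∀ (n : Nat) (l : List α), (∀ x ∈ l, 0 ≤ f x ∧ f x < n) →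
    ((List.range n).reverse.flatMap
      (fun (s : Nat) => l.filter (fun x => decide (f x = (s : Int))))).Perm l := by
  intro n
  induction n with
  | zero =>
    intro l h
    cases l with
    | nil => simp
    | cons x t =>
      exfalso
      have := h x (by simp)
      push_cast at this
      omega
  | succ n ih =>
    intro l h
    have hrev : (List.range (n+1)).reverse = n :: (List.range n).reverse := by
      rw [List.range_succ]; simp
    rw [hrev, List.flatMap_cons]
    have hflat : (List.range n).reverse.flatMap
          (fun (s : Nat) => l.filter (fun x => decide (f x = (s : Int))))
        = (List.range n).reverse.flatMap
            (fun (s : Nat) => (l.filter (fun x => !decide (f x = (n : Int)))).filter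
              (fun x => decide (f x = (s : Int)))) := by
      apply List.flatMap_congr
      intro s hs
      have hs' : s < n := List.mem_range.mp (by simpa using hs)
      rw [List.filter_filter]
      apply List.filter_congr
      intro x _
      by_cases hx : f x = (s : Int)
      · simp [hx]
        omega
      · simp [hx]
    rw [hflat]
    have hsub : ∀ x ∈ l.filter (fun x => !decide (f x = (n : Int))), 0 ≤ f x ∧ f x < n := by
      intro x hx
      have hm := List.mem_filter.mp hx
      have h1 := h x hm.1
      have hne : ¬ f x = (n : Int) := by simpa using hm.2
      push_cast at h1 ⊢
      omega
    exact ((ih _ hsub).append_left _).trans (List.filter_append_perm _ l)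

-- setting one cell of a range-indexed table
theorem pv_set_map_range {α : Type} (g : Nat → α) (n j : Nat) (v : α) (_hj : j < n) :
    ((List.range n).map g).set j v = (List.range n).map (fun s => if s = j then v else g s) := by
  apply List.ext_getElem
  · simp
  · intro i h1 h2
    have hi : i < n := by simpa using h2
    by_cases hij : i = j
    · simp [hij]
    · have hji : ¬ j = i := fun h => hij h.symm
      simp [hji, hij]

-- the bucket-filling loop of B computes, for each score s, the subsequence of score s
theorem pv_buckets (sc : String → Nat) (n : Nat) (hsc : ∀ m, sc m < n) (l : List String) :
    l.foldl (fun bs m => bs.set (sc m) (bs.getD (sc m) [] ++ [m])) (List.replicate n [])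
      = (List.range n).map (fun s => l.filter (fun m => decide (sc m = s))) := by
  induction l using List.reverseRecOn with
  | nil =>
    apply List.ext_getElem
    · simp
    · intro i h1 h2; simp
  | append_singleton t m ih =>
    rw [List.foldl_append, ih]
    simp only [List.foldl_cons, List.foldl_nil]
    have hget : ((List.range n).map (fun s => t.filter (fun x => decide (sc x = s)))).getD (sc m) []
        = t.filter (fun x => decide (sc x = sc m)) := by
      rw [List.getD_eq_getElem _ _ (by simpa using hsc m)]
      simp
    rw [hget, pv_set_map_range _ _ _ _ (hsc m)]
    apply List.map_congr_left
    intro s _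
    by_cases hs : s = sc m
    · simp [hs, List.filter_append]
    · have hms : ¬ sc m = s := fun h => hs h.symm
      simp [hs, List.filter_append, hms]

-- core equality of the two else-branch pipelines, for an arbitrary keyword list
theorem pv_core (memories : List String) (kws : List String) :
    ((PySem.List.sorted2
        ((PySem.List.enumerate memories).foldl (fun acc im =>
          acc ++ [(((kws.filter (fun k => PySem.Str.isIn k (PySem.Str.lower im.2))).map
              (fun _ => (1:Int))).sum, im.1, im.2)]) [])
        (fun x => -x.1) (fun x => x.2.1)).filter
          (fun x => decide ((0:Int) < x.1))).map (fun x => x.2.2)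
      ++ ((PySem.List.sorted2
        ((PySem.List.enumerate memories).foldl (fun acc im =>
          acc ++ [(((kws.filter (fun k => PySem.Str.isIn k (PySem.Str.lower im.2))).map
              (fun _ => (1:Int))).sum, im.1, im.2)]) [])
        (fun x => -x.1) (fun x => x.2.1)).filter
          (fun x => decide (x.1 = (0:Int)))).map (fun x => x.2.2)
    = (memories.foldl (fun bs m =>
          bs.set (kws.filter (fun k => PySem.Str.isIn k (PySem.Str.lower m))).length
            (bs.getD (kws.filter (fun k => PySem.Str.isIn k (PySem.Str.lower m))).length [] ++ [m]))
        (List.replicate (kws.length + 1) [])).reverse.foldl (fun acc b => acc ++ b) [] := by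
  have K := kws.length
  have hsc : ∀ m : String, pvSc kws m < kws.length + 1 := by
    intro m
    have := List.length_filter_le (fun k => PySem.Str.isIn k (PySem.Str.lower m)) kws
    simp only [pvSc]; omega
  -- A's scoring loop builds the mapped enumeration
  have hscored : (PySem.List.enumerate memories).foldl (fun acc im =>
        acc ++ [(((kws.filter (fun k => PySem.Str.isIn k (PySem.Str.lower im.2))).map
            (fun _ => (1:Int))).sum, im.1, im.2)]) []
      = (PySem.List.enumerate memories).map
          (fun im => ((pvSc kws im.2 : Int), im.1, im.2)) := by
    rw [PySem.List.foldl_append_singleton_eq_map]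
    simp only [List.nil_append]
    apply List.map_congr_left
    intro im _
    simp [pvSc]
  rw [hscored]
  set E := PySem.List.enumerate memories with hE
  set scored := E.map (fun im => ((pvSc kws im.2 : Int), im.1, im.2)) with hscored'
  set T := (List.range (kws.length + 1)).reverse.flatMap
      (fun (s : Nat) => scored.filter (fun x => decide (x.1 = (s : Int)))) with hT
  -- the sort result is exactly the score-descending, index-ascending bucket readout
  have hsrt : PySem.List.sorted2 scored (fun x => -x.1) (fun x => x.2.1) = T := by
    rw [pv_sorted2_eq]
    apply PySem.List.sorted_eq_of_perm_of_pairwise_lt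
    · -- permutation
      have := pv_part_perm (fun x : Int × Int × String => x.1) (kws.length + 1) scored ?_
      · simpa [hT] using this
      · intro x hx
        rcases List.mem_map.mp hx with ⟨im, _, rfl⟩
        refine ⟨by positivity, ?_⟩
        show ((pvSc kws im.2 : Nat) : Int) < ((kws.length + 1 : Nat) : Int)
        exact_mod_cast hsc im.2
    · -- strictly increasing lexicographic keys
      rw [hT, List.flatMap_def, List.pairwise_flatten]
      constructor
      · intro l' hl'
        rcases List.mem_map.mp hl' with ⟨s, _, rfl⟩
        have hsnd : scored.Pairwise (fun a b => a.2.1 < b.2.1) := by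
          rw [hscored', List.pairwise_map]
          exact pv_enum_pairwise memories 0
        refine (hsnd.filter _).imp_of_mem ?_
        intro a b ha hb hab
        have ha1 : a.1 = (s : Int) := by simpa using (List.mem_filter.mp ha).2
        have hb1 : b.1 = (s : Int) := by simpa using (List.mem_filter.mp hb).2
        rw [Prod.Lex.toLex_lt_toLex]
        exact Or.inr ⟨by rw [ha1, hb1], hab⟩
      · rw [List.pairwise_map, List.pairwise_reverse]
        have : (List.range (kws.length + 1)).Pairwise (· < ·) := List.pairwise_lt_range
        refine this.imp_of_mem ?_
        intro s1 s2 _ _ h12 x hx y hy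
        have hx1 : x.1 = (s2 : Int) := by simpa using (List.mem_filter.mp hx).2
        have hy1 : y.1 = (s1 : Int) := by simpa using (List.mem_filter.mp hy).2
        rw [Prod.Lex.toLex_lt_toLex]
        left
        rw [hx1, hy1]
        push_cast
        omega
  rw [hsrt]
  -- split the bucket readout at score 0 (the last block)
  have hsplit : (List.range (kws.length + 1)).reverse = (List.range' 1 kws.length).reverse ++ [0] := by
    rw [List.range_eq_range', List.range'_succ]
    simp
  have hTsplit : T = (List.range' 1 kws.length).reverse.flatMap
        (fun (s : Nat) => scored.filter (fun x => decide (x.1 = (s : Int))))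
      ++ scored.filter (fun x => decide (x.1 = (0 : Int))) := by
    rw [hT, hsplit, List.flatMap_append]
    simp
  set Tpos := (List.range' 1 kws.length).reverse.flatMap
      (fun (s : Nat) => scored.filter (fun x => decide (x.1 = (s : Int)))) with hTpos
  set B0 := scored.filter (fun x => decide (x.1 = (0 : Int))) with hB0
  have hTposPos : ∀ x ∈ Tpos, (0 : Int) < x.1 := by
    intro x hx
    rcases List.mem_flatMap.mp hx with ⟨s, hs, hxs⟩
    have hs1 : 1 ≤ s := (List.mem_range'_1.mp (by simpa using hs)).1
    have hx1 : x.1 = (s : Int) := by simpa using (List.mem_filter.mp hxs).2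
    rw [hx1]
    exact_mod_cast hs1
  have hB0Zero : ∀ x ∈ B0, x.1 = (0 : Int) := by
    intro x hx
    simpa using (List.mem_filter.mp hx).2
  have hhigh : T.filter (fun x => decide ((0:Int) < x.1)) = Tpos := by
    rw [hTsplit, List.filter_append]
    rw [List.filter_eq_self.mpr (by intro a ha; simpa using hTposPos a ha),
        List.filter_eq_nil_iff.mpr (by intro a ha; simp [hB0Zero a ha]),
        List.append_nil]
  have hlow : T.filter (fun x => decide (x.1 = (0:Int))) = B0 := by
    rw [hTsplit, List.filter_append]
    rw [List.filter_eq_nil_iff.mpr (by intro a ha; have := hTposPos a ha; simp; omega),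
        List.nil_append]
    rw [List.filter_eq_self.mpr (by intro a ha; simp [hB0Zero a ha])]
  rw [hhigh, hlow, ← List.map_append]
  rw [show Tpos ++ B0 = T from hTsplit.symm]
  -- the third components of the readout are B's buckets
  have hmap : T.map (fun x => x.2.2)
      = (List.range (kws.length + 1)).reverse.flatMap
          (fun (s : Nat) => memories.filter (fun m => decide (pvSc kws m = s))) := by
    rw [hT, List.map_flatMap]
    apply List.flatMap_congr
    intro s _
    rw [hscored', List.filter_map, List.map_map]
    have hp : ((fun x : Int × Int × String => decide (x.1 = (s : Int))) ∘
          (fun im : Int × String => ((pvSc kws im.2 : Int), im.1, im.2)))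
        = fun im : Int × String => decide (pvSc kws im.2 = s) := by
      funext im
      simp [Function.comp]
    rw [hp]
    exact pv_enum_map_filter memories 0 (fun m => decide (pvSc kws m = s))
  rw [hmap]
  -- B's side: buckets then concatenation
  rw [pv_buckets (fun m => (kws.filter (fun k => PySem.Str.isIn k (PySem.Str.lower m))).length)
      (kws.length + 1) hsc memories]
  rw [PySem.List.foldl_append_eq_flatten, List.nil_append, ← List.map_reverse, ← List.flatMap_def]
  rfl

theorem pv_main (memories : List String) (topic : String) (max_items : Int) :
    filter_memories_for_topic memories topic max_items
      = filter_memories_for_topic_alt memories topic max_items := by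
  unfold filter_memories_for_topic filter_memories_for_topic_alt
  by_cases h1 : (memories.isEmpty || topic == "") = true
  · rw [if_pos h1, if_pos h1]
  · rw [if_neg h1, if_neg h1]
    by_cases h2 : PySem.Dict.getD pvTopicKw (PySem.Str.lower topic) [] = []
    · rw [if_pos h2, if_pos h2]
    · rw [if_neg h2, if_neg h2]
      exact congrArg (fun l => PySem.List.slice l none (some max_items))
        (pv_core memories (PySem.Dict.getD pvTopicKw (PySem.Str.lower topic) []))

-- ===== VERDICT (by name: the statement is the Claim_ definition above) =====
theorem filter_memories_for_topic_spec : Claim_equal_filter_memories_for_topic := by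
  intro memories topic max_items _
  show filter_memories_for_topic memories topic max_items
      = filter_memories_for_topic_alt memories topic max_items
  exact pv_main memories topic max_items
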